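-- pv_equiv track=rewrite | github.com/ZekNikZ/adventofcode2022 | day08/puzzle1-bkp.py | check_visibility_horizontal
-- ===== SOURCE A (Python) =====
-- def check_visibility_horizontal(grid):
--     res = set()
--
--     max_heights = [-1] * len(grid)
--
--     for col in range(len(grid[0])):
--         for row in range(len(grid)):
--             if grid[row][col] > max_heights[row]:
--                 max_heights[row] = grid[row][col]
--                 res.add((row, col))
--
--     return res
-- ===== SOURCE B (Python) =====
-- def check_visibility_horizontal(grid):
--     rows, cols = len(grid), len(grid[0])
--     return {(row, col)
--             for col in range(cols)
--             for row in range(rows)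
--             if grid[row][col] > -1
--             and all(grid[row][j] < grid[row][col] for j in range(col))}
-- ===== Notes on version B (the rewrite author's own statement) =====
-- stated objective: alternative
-- what changed: A streams through the grid maintaining a per-row running-maximum array; B is stateless: a set comprehension that declares a cell visible exactly when it exceeds -1 and every cell to its left in the row is strictly smaller, re-scanning the left prefix per cell.
import Mathlib
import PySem

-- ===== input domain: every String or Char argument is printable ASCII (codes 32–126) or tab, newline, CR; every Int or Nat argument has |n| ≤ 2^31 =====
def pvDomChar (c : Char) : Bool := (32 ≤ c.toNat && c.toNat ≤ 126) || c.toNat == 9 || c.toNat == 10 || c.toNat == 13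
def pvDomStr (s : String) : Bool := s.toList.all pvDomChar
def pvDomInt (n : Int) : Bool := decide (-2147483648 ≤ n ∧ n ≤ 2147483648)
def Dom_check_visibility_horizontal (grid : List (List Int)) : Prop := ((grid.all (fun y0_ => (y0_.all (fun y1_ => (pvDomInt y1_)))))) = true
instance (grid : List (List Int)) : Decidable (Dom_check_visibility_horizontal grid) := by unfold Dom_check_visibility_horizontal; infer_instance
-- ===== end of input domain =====

-- B drops A's running-maximum state entirely: a stateless comprehension marks a cell visible
-- iff it exceeds -1 and every cell to its left in the row is strictly smaller (alternative, not faster).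

-- ===== PORT A =====
def check_visibility_horizontal (grid : List (List Int)) : List (Int × Int) :=
  let res : PySem.Set (Int × Int) := PySem.Set.empty
  let max_heights : List Int := List.replicate grid.length (-1)
  ((PySem.List.pyRange 0 ((PySem.List.pyGetD grid 0 []).length : Int) 1).foldl
    (fun (st : List Int × PySem.Set (Int × Int)) col =>
      (PySem.List.pyRange 0 (grid.length : Int) 1).foldl
        (fun st row =>
          if PySem.List.pyGetD (PySem.List.pyGetD grid row []) col 0 > PySem.List.pyGetD st.1 row 0 then
            (PySem.List.pySetD st.1 row (PySem.List.pyGetD (PySem.List.pyGetD grid row []) col 0),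
             PySem.Set.add st.2 (row, col))
          else st) st)
    (max_heights, res)).2

-- ===== PORT B =====
def check_visibility_horizontal_alt (grid : List (List Int)) : List (Int × Int) :=
  let rows : Int := (grid.length : Int)
  let cols : Int := ((PySem.List.pyGetD grid 0 []).length : Int)
  (PySem.List.pyRange 0 cols 1).foldl
    (fun (s : PySem.Set (Int × Int)) col =>
      (PySem.List.pyRange 0 rows 1).foldl
        (fun s row =>
          if PySem.List.pyGetD (PySem.List.pyGetD grid row []) col 0 > -1 ∧
             ((PySem.List.pyRange 0 col 1).all fun j =>
               PySem.List.pyGetD (PySem.List.pyGetD grid row []) j 0 <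
               PySem.List.pyGetD (PySem.List.pyGetD grid row []) col 0) = true
          then PySem.Set.add s (row, col) else s) s)
    PySem.Set.empty

-- ===== PRECONDITION & SPEC =====
-- Pre_ excludes exactly the inputs where Python A raises IndexError (empty grid via grid[0];
-- a row shorter than row 0, indexed past its end); B raises there as well.
def Pre_check_visibility_horizontal (grid : List (List Int)) : Prop :=
  grid ≠ [] ∧ ∀ r ∈ grid, (grid.headD []).length ≤ r.length
instance (grid : List (List Int)) : Decidable (Pre_check_visibility_horizontal grid) := by
  unfold Pre_check_visibility_horizontal; infer_instance

def pvWitness_check_visibility_horizontal : List (List Int) := [[3, 1], [2, 5]]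

def Spec_check_visibility_horizontal (grid : List (List Int)) (out : List (Int × Int)) : Prop := out = check_visibility_horizontal_alt grid
instance (grid : List (List Int)) (out : List (Int × Int)) : Decidable (Spec_check_visibility_horizontal grid out) := by unfold Spec_check_visibility_horizontal; infer_instance

-- ===== CLAIM (what is proved, stated in full; the proofs are below) =====
def Claim_equal_check_visibility_horizontal : Prop := ∀ (grid : List (List Int)), Dom_check_visibility_horizontal grid → Pre_check_visibility_horizontal grid → Spec_check_visibility_horizontal grid (check_visibility_horizontal grid)

-- ===== LEMMAS AND PROOFS =====

-- running maximum of r[0..c-1] starting at -1 (A's max_heights entry)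
def pvPM (r : List Int) (c : Nat) : Int :=
  (List.range c).foldl (fun m j => if r.getD j 0 > m then r.getD j 0 else m) (-1)

def pvVis (r : List Int) (c : Nat) : Bool := decide (r.getD c 0 > pvPM r c)

-- visible pairs of column c among rows < k
def pvColPairsK (grid : List (List Int)) (c k : Nat) : List (Int × Int) :=
  (List.range k).filterMap
    (fun row => if pvVis (grid.getD row []) c then some (((row : Int), (c : Int))) else none)

def pvMH (grid : List (List Int)) (c : Nat) : List Int :=
  (List.range grid.length).map (fun row => pvPM (grid.getD row []) c)

def pvMHpart (grid : List (List Int)) (c k : Nat) : List Int :=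
  (List.range grid.length).map
    (fun row => if row < k then pvPM (grid.getD row []) (c + 1) else pvPM (grid.getD row []) c)

def pvSpec (grid : List (List Int)) (cols : Nat) : List (Int × Int) :=
  (List.range cols).flatMap (fun c => pvColPairsK grid c grid.length)

lemma pvPM_succ (r : List Int) (c : Nat) :
    pvPM r (c + 1) = if r.getD c 0 > pvPM r c then r.getD c 0 else pvPM r c := by
  simp [pvPM, List.range_succ]

lemma mem_pvColPairsK {grid : List (List Int)} {c k : Nat} {p : Int × Int}
    (h : p ∈ pvColPairsK grid c k) : p.2 = (c : Int) ∧ ∃ row : Nat, row < k ∧ p.1 = (row : Int) := by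
  simp only [pvColPairsK, List.mem_filterMap, List.mem_range] at h
  obtain ⟨row, hrow, hif⟩ := h
  split at hif
  · cases hif
    exact ⟨rfl, row, hrow, rfl⟩
  · cases hif

lemma mem_pvSpec {grid : List (List Int)} {cols : Nat} {p : Int × Int}
    (h : p ∈ pvSpec grid cols) : ∃ c : Nat, c < cols ∧ p.2 = (c : Int) := by
  simp only [pvSpec, List.mem_flatMap, List.mem_range] at h
  obtain ⟨c, hc, hp⟩ := h
  exact ⟨c, hc, (mem_pvColPairsK hp).1⟩

lemma A_inner (grid : List (List Int)) (c k : Nat) (hk : k ≤ grid.length)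
    (acc : List (Int × Int)) (hacc : ∀ p ∈ acc, p.2 < (c : Int)) :
    ((PySem.List.pyRange 0 (k : Int) 1).foldl
      (fun (st : List Int × PySem.Set (Int × Int)) row =>
        if PySem.List.pyGetD (PySem.List.pyGetD grid row []) (c : Int) 0 > PySem.List.pyGetD st.1 row 0 then
          (PySem.List.pySetD st.1 row (PySem.List.pyGetD (PySem.List.pyGetD grid row []) (c : Int) 0),
           PySem.Set.add st.2 (row, (c : Int)))
        else st)
      (pvMH grid c, acc))
    = (pvMHpart grid c k, acc ++ pvColPairsK grid c k) := by
  induction k with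
  | zero => simp [PySem.List.pyRange_one_eq_nil (le_refl (0:Int)), pvMHpart, pvMH, pvColPairsK]
  | succ k ih =>
    have hk' : k ≤ grid.length := Nat.le_of_succ_le hk
    have hcast : ((k + 1 : Nat) : Int) = (k : Int) + 1 := by push_cast; ring
    rw [hcast, PySem.List.pyRange_one_succ_right (by positivity), List.foldl_append, ih hk']
    have hmh : PySem.List.pyGetD (pvMHpart grid c k) ((k : Nat) : Int) 0
        = pvPM (grid.getD k []) c := by
      rw [PySem.List.pyGetD_natCast]
      unfold pvMHpart
      rw [PySem.List.getD_map_range _ _ _ _ (by omega)]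
      simp
    have hval : PySem.List.pyGetD (PySem.List.pyGetD grid ((k : Nat) : Int) []) ((c : Nat) : Int) 0
        = (grid.getD k []).getD c 0 := by
      rw [PySem.List.pyGetD_natCast, PySem.List.pyGetD_natCast]
    have hpairs : pvColPairsK grid c (k + 1)
        = pvColPairsK grid c k ++ (if pvVis (grid.getD k []) c then [(((k : Nat) : Int), ((c : Nat) : Int))] else []) := by
      unfold pvColPairsK
      rw [List.range_succ, List.filterMap_append, List.filterMap_cons]
      by_cases hv : pvVis (grid.getD k []) c = true
      · rw [if_pos hv, if_pos hv]
        simp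
      · rw [if_neg hv, if_neg hv]
        simp
    have hfresh : (((k : Nat) : Int), ((c : Nat) : Int)) ∉ acc ++ pvColPairsK grid c k := by
      intro hmem
      rcases List.mem_append.mp hmem with h1 | h1
      · have := hacc _ h1; simp at this
      · obtain ⟨_, row, hrow, hfst⟩ := mem_pvColPairsK h1
        simp at hfst; omega
    simp only [List.foldl_cons, List.foldl_nil]
    simp only [hval, hmh]
    by_cases hv : pvVis (grid.getD k []) c
    · have hgt : (grid.getD k []).getD c 0 > pvPM (grid.getD k []) c := by
        simpa [pvVis] using hv
      rw [if_pos hgt]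
      refine Prod.ext ?_ ?_
      · show PySem.List.pySetD (pvMHpart grid c k) ((k : Nat) : Int) _ = pvMHpart grid c (k + 1)
        rw [PySem.List.pySetD_natCast]
        apply List.ext_getElem
        · simp [pvMHpart]
        · intro i h1 h2
          rw [List.getElem_set]
          simp only [pvMHpart, List.getElem_map, List.getElem_range]
          by_cases hik : k = i
          · subst hik
            rw [if_pos rfl]
            rw [pvPM_succ, if_pos hgt]
            simp
          · rw [if_neg hik]
            have heq : (i < k + 1) = (i < k) := by
              apply propext; constructor <;> intro <;> omega
            simp [heq]
      · show PySem.Set.add (acc ++ pvColPairsK grid c k) _ = acc ++ pvColPairsK grid c (k + 1)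
        rw [PySem.Set.add_of_not_mem hfresh, hpairs, if_pos hv]
        simp
    · have hle : ¬ ((grid.getD k []).getD c 0 > pvPM (grid.getD k []) c) := by
        simpa [pvVis] using hv
      rw [if_neg hle]
      refine Prod.ext ?_ ?_
      · show pvMHpart grid c k = pvMHpart grid c (k + 1)
        unfold pvMHpart
        apply List.map_congr_left
        intro row hrow
        by_cases hik : row = k
        · subst hik
          rw [if_neg (by omega), if_pos (by omega), pvPM_succ, if_neg hle]
        · have heq : (row < k + 1) = (row < k) := by
            apply propext; constructor <;> intro <;> omega
          simp [heq]
      · show acc ++ pvColPairsK grid c k = acc ++ pvColPairsK grid c (k + 1)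
        rw [hpairs, if_neg hv]
        simp

lemma A_outer (grid : List (List Int)) (c : Nat) :
    ((PySem.List.pyRange 0 (c : Int) 1).foldl
      (fun (st : List Int × PySem.Set (Int × Int)) col =>
        (PySem.List.pyRange 0 (grid.length : Int) 1).foldl
          (fun st row =>
            if PySem.List.pyGetD (PySem.List.pyGetD grid row []) col 0 > PySem.List.pyGetD st.1 row 0 then
              (PySem.List.pySetD st.1 row (PySem.List.pyGetD (PySem.List.pyGetD grid row []) col 0),
               PySem.Set.add st.2 (row, col))
            else st) st)
      (List.replicate grid.length (-1), (PySem.Set.empty : PySem.Set (Int × Int))))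
    = (pvMH grid c, pvSpec grid c) := by
  induction c with
  | zero =>
    rw [Nat.cast_zero, PySem.List.pyRange_one_eq_nil (le_refl (0:Int))]
    simp [pvMH, pvSpec, pvPM, List.map_const', PySem.Set.empty]
  | succ c ih =>
    have hcast : ((c + 1 : Nat) : Int) = (c : Int) + 1 := by push_cast; ring
    rw [hcast, PySem.List.pyRange_one_succ_right (by positivity), List.foldl_append, ih]
    have hacc : ∀ p ∈ pvSpec grid c, p.2 < ((c : Nat) : Int) := by
      intro p hp
      obtain ⟨c', hc', hsnd⟩ := mem_pvSpec hp
      rw [hsnd]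
      exact_mod_cast hc'
    simp only [List.foldl_cons, List.foldl_nil]
    rw [A_inner grid c grid.length le_rfl (pvSpec grid c) hacc]
    refine Prod.ext ?_ ?_
    · show pvMHpart grid c grid.length = pvMH grid (c + 1)
      unfold pvMHpart pvMH
      apply List.map_congr_left
      intro row hrow
      simp only [List.mem_range] at hrow
      simp [hrow]
    · show pvSpec grid c ++ pvColPairsK grid c grid.length = pvSpec grid (c + 1)
      simp [pvSpec, List.range_succ]

-- B's stateless visibility test equals "greater than the running maximum"
lemma gt_pvPM (r : List Int) (c : Nat) (v : Int) :
    v > pvPM r c ↔ v > -1 ∧ ∀ j < c, r.getD j 0 < v := by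
  induction c with
  | zero => simp [pvPM]
  | succ c ih =>
    have hmax : pvPM r (c + 1) = max (pvPM r c) (r.getD c 0) := by
      rw [pvPM_succ]
      by_cases h : r.getD c 0 ≤ pvPM r c
      · rw [if_neg (not_lt.mpr h), max_eq_left h]
      · have h' := not_le.mp h
        rw [if_pos h', max_eq_right h'.le]
    rw [show (v > pvPM r (c + 1)) = (max (pvPM r c) (r.getD c 0) < v) by rw [hmax],
      max_lt_iff]
    constructor
    · rintro ⟨h1, h2⟩
      obtain ⟨hneg, hall⟩ := ih.mp h1
      refine ⟨hneg, fun j hj => ?_⟩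
      rcases Nat.lt_succ_iff_lt_or_eq.mp hj with h | h
      · exact hall j h
      · subst h; exact h2
    · rintro ⟨hneg, hall⟩
      exact ⟨ih.mpr ⟨hneg, fun j hj => hall j (Nat.lt_succ_of_lt hj)⟩,
        hall c (Nat.lt_succ_self c)⟩

lemma cond_iff_vis (r : List Int) (c : Nat) :
    (PySem.List.pyGetD r ((c : Nat) : Int) 0 > -1 ∧
      ((PySem.List.pyRange 0 ((c : Nat) : Int) 1).all fun j =>
        PySem.List.pyGetD r j 0 < PySem.List.pyGetD r ((c : Nat) : Int) 0) = true)
    ↔ pvVis r c = true := by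
  rw [PySem.List.pyRange_zero_natCast]
  simp only [List.all_map, List.all_eq_true, List.mem_range, Function.comp,
    PySem.List.pyGetD_natCast, decide_eq_true_eq]
  rw [pvVis, decide_eq_true_eq, gt_pvPM]

lemma B_inner (grid : List (List Int)) (c k : Nat) (hk : k ≤ grid.length)
    (s : List (Int × Int)) (hs : ∀ p ∈ s, p.2 < (c : Int)) :
    ((PySem.List.pyRange 0 (k : Int) 1).foldl
      (fun (s : PySem.Set (Int × Int)) row =>
        if PySem.List.pyGetD (PySem.List.pyGetD grid row []) ((c : Nat) : Int) 0 > -1 ∧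
           ((PySem.List.pyRange 0 ((c : Nat) : Int) 1).all fun j =>
             PySem.List.pyGetD (PySem.List.pyGetD grid row []) j 0 <
             PySem.List.pyGetD (PySem.List.pyGetD grid row []) ((c : Nat) : Int) 0) = true
        then PySem.Set.add s (row, ((c : Nat) : Int)) else s) s)
    = s ++ pvColPairsK grid c k := by
  induction k with
  | zero => simp [PySem.List.pyRange_one_eq_nil (le_refl (0:Int)), pvColPairsK]
  | succ k ih =>
    have hk' : k ≤ grid.length := Nat.le_of_succ_le hk
    have hcast : ((k + 1 : Nat) : Int) = (k : Int) + 1 := by push_cast; ring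
    rw [hcast, PySem.List.pyRange_one_succ_right (by positivity), List.foldl_append, ih hk']
    have hrow : PySem.List.pyGetD grid ((k : Nat) : Int) [] = grid.getD k [] := by
      rw [PySem.List.pyGetD_natCast]
    have hpairs : pvColPairsK grid c (k + 1)
        = pvColPairsK grid c k ++ (if pvVis (grid.getD k []) c then [(((k : Nat) : Int), ((c : Nat) : Int))] else []) := by
      unfold pvColPairsK
      rw [List.range_succ, List.filterMap_append, List.filterMap_cons]
      by_cases hv : pvVis (grid.getD k []) c = true
      · rw [if_pos hv, if_pos hv]
        simp
      · rw [if_neg hv, if_neg hv]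
        simp
    have hfresh : (((k : Nat) : Int), ((c : Nat) : Int)) ∉ s ++ pvColPairsK grid c k := by
      intro hmem
      rcases List.mem_append.mp hmem with h1 | h1
      · have := hs _ h1; simp at this
      · obtain ⟨_, row, hrow', hfst⟩ := mem_pvColPairsK h1
        simp at hfst; omega
    simp only [List.foldl_cons, List.foldl_nil, hrow]
    by_cases hv : pvVis (grid.getD k []) c = true
    · rw [if_pos ((cond_iff_vis (grid.getD k []) c).mpr hv),
        PySem.Set.add_of_not_mem hfresh, hpairs, if_pos hv]
      simp
    · rw [if_neg (fun hcond => hv ((cond_iff_vis (grid.getD k []) c).mp hcond)),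
        hpairs, if_neg hv]
      simp

lemma B_outer (grid : List (List Int)) (c : Nat) :
    ((PySem.List.pyRange 0 (c : Int) 1).foldl
      (fun (s : PySem.Set (Int × Int)) col =>
        (PySem.List.pyRange 0 (grid.length : Int) 1).foldl
          (fun s row =>
            if PySem.List.pyGetD (PySem.List.pyGetD grid row []) col 0 > -1 ∧
               ((PySem.List.pyRange 0 col 1).all fun j =>
                 PySem.List.pyGetD (PySem.List.pyGetD grid row []) j 0 <
                 PySem.List.pyGetD (PySem.List.pyGetD grid row []) col 0) = true
            then PySem.Set.add s (row, col) else s) s)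
      (PySem.Set.empty : PySem.Set (Int × Int)))
    = pvSpec grid c := by
  induction c with
  | zero =>
    rw [Nat.cast_zero, PySem.List.pyRange_one_eq_nil (le_refl (0:Int))]
    simp [pvSpec, PySem.Set.empty]
  | succ c ih =>
    have hcast : ((c + 1 : Nat) : Int) = (c : Int) + 1 := by push_cast; ring
    rw [hcast, PySem.List.pyRange_one_succ_right (by positivity), List.foldl_append, ih]
    have hs : ∀ p ∈ pvSpec grid c, p.2 < ((c : Nat) : Int) := by
      intro p hp
      obtain ⟨c'', hc'', hsnd⟩ := mem_pvSpec hp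
      rw [hsnd]
      exact_mod_cast hc''
    simp only [List.foldl_cons, List.foldl_nil]
    rw [B_inner grid c grid.length le_rfl (pvSpec grid c) hs]
    simp [pvSpec, List.range_succ]

lemma A_eq_spec (grid : List (List Int)) :
    check_visibility_horizontal grid = pvSpec grid (PySem.List.pyGetD grid 0 []).length := by
  exact congrArg Prod.snd (A_outer grid (PySem.List.pyGetD grid 0 []).length)

lemma B_eq_spec (grid : List (List Int)) :
    check_visibility_horizontal_alt grid = pvSpec grid (PySem.List.pyGetD grid 0 []).length := by
  exact B_outer grid (PySem.List.pyGetD grid 0 []).length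

-- ===== VERDICT (by name: the statement is the Claim_ definition above) =====
theorem check_visibility_horizontal_spec : Claim_equal_check_visibility_horizontal := by
  intro grid _ _
  unfold Spec_check_visibility_horizontal
  rw [A_eq_spec, B_eq_spec]
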